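-- pv_equiv track=rewrite | github.com/DivineJK/MyPythonLibrary | MathLibrary/FHT.py | xor_convolution
-- ===== SOURCE A (Python) =====
-- def inved(a, modulo):
--     x, y, u, v, k, l = 1, 0, 0, 1, a, modulo
--     while l:
--         x, y, u, v, k, l = u, v, x - u * (k // l), y - v * (k // l), l, k % l
--     return x % modulo
--
-- def fht(f, n, MOD):
--     if n == 1:
--         return f
--     depth = len(bin(n))-3
--     res = [0]*n
--     pos = 0
--     for i in range(n):
--         res[i] = f[pos]
--         tmp = ((i+1)&-(i+1)) << 1
--         pos ^= (n-1)&(n-n//tmp)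
--     left = 2
--     right = 1
--     thgir = n >> 1
--     for i in range(depth):
--         grow = 1
--         for k in range(right):
--             idx_l = k
--             idx_r = k + right
--             for j in range(thgir):
--                 u = res[idx_l]
--                 v = res[idx_r]
--                 res[idx_l] = (u + v) % MOD
--                 res[idx_r] = (u - v) % MOD
--                 idx_l += left
--                 idx_r += left
--         left <<= 1
--         right <<= 1
--         thgir >>= 1
--     return res
--
-- def xor_convolution(f, g, MOD):
--     n = len(f)
--     m = len(f)
--     bin_top = 1
--     while bin_top < max(n, m):
--         bin_top <<= 1
--     x = f[:] + [0]*(bin_top-n)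
--     y = g[:] + [0]*(bin_top-m)
--     x = fht(x, bin_top, MOD)
--     y = fht(y, bin_top, MOD)
--     for i in range(bin_top):
--         x[i] = x[i] * y[i] % MOD
--     x = fht(x, bin_top, MOD)
--     ib = inved(bin_top, MOD)
--     for i in range(bin_top):
--         x[i] = x[i] * ib % MOD
--     return x
-- ===== SOURCE B (Python) =====
-- def inved(a, modulo):
--     # same small modular-inverse helper as the original module
--     x, y, u, v, k, l = 1, 0, 0, 1, a, modulo
--     while l:
--         x, y, u, v, k, l = u, v, x - u * (k // l), y - v * (k // l), l, k % l
--     return x % modulo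
--
-- def _wht(a, n, MOD):
--     # Walsh-Hadamard transform evaluated directly by its defining formula
--     return [sum(-v if bin(i & j).count("1") % 2 else v for j, v in enumerate(a[:n])) % MOD
--             for i in range(n)]
--
-- def xor_convolution(f, g, MOD):
--     n = len(f)
--     bin_top = 1
--     while bin_top < n:
--         bin_top <<= 1
--     x = _wht(f + [0] * (bin_top - n), bin_top, MOD)
--     y = _wht(g + [0] * (bin_top - n), bin_top, MOD)
--     z = _wht([p * q % MOD for p, q in zip(x, y)], bin_top, MOD)
--     ib = inved(bin_top, MOD)
--     return [w * ib % MOD for w in z]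
-- ===== Notes on version B (the rewrite author's own statement) =====
-- stated objective: simpler
-- what changed: The iterative FWHT with its bit-reversal permutation pass and strided butterfly stages is replaced by the Walsh-Hadamard transform evaluated directly from its defining sign-sum formula; the wrapper (padding by len(f), pointwise product, scaling by inved(bin_top)) is kept.
import Mathlib
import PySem

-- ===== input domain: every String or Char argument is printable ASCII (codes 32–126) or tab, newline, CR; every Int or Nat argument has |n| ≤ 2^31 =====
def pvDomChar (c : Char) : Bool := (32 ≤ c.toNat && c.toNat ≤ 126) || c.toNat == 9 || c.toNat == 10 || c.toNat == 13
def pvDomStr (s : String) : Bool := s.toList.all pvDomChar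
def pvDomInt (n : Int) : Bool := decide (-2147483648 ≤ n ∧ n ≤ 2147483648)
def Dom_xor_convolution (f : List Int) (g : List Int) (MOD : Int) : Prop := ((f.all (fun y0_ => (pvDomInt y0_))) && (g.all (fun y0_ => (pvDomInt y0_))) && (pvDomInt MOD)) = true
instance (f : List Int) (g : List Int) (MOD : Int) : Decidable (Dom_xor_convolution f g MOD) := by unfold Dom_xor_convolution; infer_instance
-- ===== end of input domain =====

-- B replaces the FWHT (bit-reversal pass + strided butterflies) by the Walsh–Hadamard
-- transform computed directly from its defining sign-sum formula; the wrapper is kept.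

-- ===== PORT A =====

-- extended-Euclid loop of `inved` (shared helper of both Python files, verbatim in each)
def invedLoop (x y u v k l : Int) : Int :=
  if hl : l = 0 then x
  else invedLoop u v (x - u * PySem.Int.floordiv k l) (y - v * PySem.Int.floordiv k l) l
        (PySem.Int.mod k l)
termination_by l.natAbs
decreasing_by
  rcases lt_or_gt_of_ne hl with h | h
  · have h1 := (PySem.Int.mod_neg_bounds k h).1
    have h2 := (PySem.Int.mod_neg_bounds k h).2
    omega
  · have h1 := PySem.Int.mod_nonneg k h
    have h2 := PySem.Int.mod_lt k h
    omega

def inved (a modulo : Int) : Int := PySem.Int.mod (invedLoop 1 0 0 1 a modulo) modulo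

-- 'bin_top = 1; while bin_top < t: bin_top <<= 1' (same loop in both Python files;
-- the '0 < b' conjunct only makes the recursion total — Python's bin_top is always ≥ 1)
def binTop (b t : Nat) : Nat :=
  if 0 < b ∧ b < t then binTop (2 * b) t else b
termination_by t - b
decreasing_by omega

-- A's fht, its two loop passes factored as named helpers.  Loop counters/indices are Nat:
-- every Python value here is a nonnegative int, where Nat ^^^ / &&& / / / << / >> are
-- Python-exact; 'depth = len(bin(n)) - 3' is transliterated via len(bin(n)) = bit_length(n) + 2
-- (exact for the reachable n >= 1); 'res[i] = v' is List.set and 'res[i]' is getD (indices are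
-- in range on all inputs where Python does not raise); the temporaries u, v of the innermost
-- loop are inlined (they are read-only).
def fhtPerm (f : List Int) (n : Nat) : List Int × Nat :=
  (List.range n).foldl (fun (st : List Int × Nat) i =>
    (st.1.set i (f.getD st.2 0),
     -- pos ^= (n-1) & (n - n//tmp)  with  tmp = ((i+1) & -(i+1)) << 1
     st.2 ^^^ ((n - 1) &&&
       (n - n / ((PySem.Int.band ((i : Int) + 1) (-((i : Int) + 1))).toNat <<< 1)))))
    (List.replicate n 0, 0)

def fhtStages (M : Int) (depth n : Nat) (res : List Int) : List Int × Nat × Nat × Nat :=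
  -- state: (res, left, right, thgir)
  (List.range depth).foldl (fun (st : List Int × Nat × Nat × Nat) _i =>
    ((List.range st.2.2.1).foldl (fun res k =>
        ((List.range st.2.2.2).foldl (fun (st2 : List Int × Nat × Nat) _j =>
          ((st2.1.set st2.2.1 (PySem.Int.mod (st2.1.getD st2.2.1 0 + st2.1.getD st2.2.2 0) M)).set
              st2.2.2 (PySem.Int.mod (st2.1.getD st2.2.1 0 - st2.1.getD st2.2.2 0) M),
           st2.2.1 + st.2.1, st2.2.2 + st.2.1)) (res, k, k + st.2.2.1)).1) st.1,
     st.2.1 <<< 1, st.2.2.1 <<< 1, st.2.2.2 >>> 1))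
    (res, 2, 1, n >>> 1)

def fhtA (f : List Int) (n : Nat) (M : Int) : List Int :=
  if n = 1 then f
  else (fhtStages M (PySem.Int.bitLength (n : Int) + 2 - 3) n (fhtPerm f n).1).1

def xor_convolution (f : List Int) (g : List Int) (MOD : Int) : List Int :=
  let n := f.length
  let m := f.length   -- Python: m = len(f)  (sic)
  let bin_top := binTop 1 (max n m)
  let x0 := f ++ List.replicate (bin_top - n) 0
  let y0 := g ++ List.replicate (bin_top - m) 0
  let x1 := fhtA x0 bin_top MOD
  let y1 := fhtA y0 bin_top MOD
  let x2 := (List.range bin_top).foldl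
    (fun acc i => acc.set i (PySem.Int.mod (acc.getD i 0 * y1.getD i 0) MOD)) x1
  let x3 := fhtA x2 bin_top MOD
  let ib := inved (bin_top : Int) MOD
  (List.range bin_top).foldl
    (fun acc i => acc.set i (PySem.Int.mod (acc.getD i 0 * ib) MOD)) x3

-- ===== PORT B =====

-- direct Walsh–Hadamard transform: bin(i & j).count("1") = bit_count(i & j) (i & j ≥ 0),
-- a[:n] = a.take n (n ≥ 0), sum(...) = foldl (+) 0 over enumerate
def whtB (a : List Int) (n : Nat) (M : Int) : List Int :=
  (List.range n).map (fun (i : Nat) =>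
    PySem.Int.mod
      ((PySem.List.enumerate (a.take n) 0).foldl
        (fun s jv =>
          s + (if PySem.Int.bitCount (PySem.Int.band (i : Int) jv.1) % 2 = 1 then -jv.2 else jv.2))
        0) M)

def xor_convolution_alt (f : List Int) (g : List Int) (MOD : Int) : List Int :=
  let n := f.length
  let bin_top := binTop 1 n
  let x := whtB (f ++ List.replicate (bin_top - n) 0) bin_top MOD
  let y := whtB (g ++ List.replicate (bin_top - n) 0) bin_top MOD
  let z := whtB ((x.zip y).map (fun pq => PySem.Int.mod (pq.1 * pq.2) MOD)) bin_top MOD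
  let ib := inved (bin_top : Int) MOD
  z.map (fun w => PySem.Int.mod (w * ib) MOD)

-- ===== PRECONDITION & SPEC =====

-- Python A raises ZeroDivisionError when MOD = 0 and IndexError when len(g) < len(f)
-- (g is padded only by len(f)'s deficit); Pre_ excludes exactly those inputs.
def Pre_xor_convolution (f : List Int) (g : List Int) (MOD : Int) : Prop :=
  MOD ≠ 0 ∧ f.length ≤ g.length
instance (f : List Int) (g : List Int) (MOD : Int) : Decidable (Pre_xor_convolution f g MOD) := by
  unfold Pre_xor_convolution; infer_instance

def pvWitness_xor_convolution : List Int × List Int × Int := ([1, 2, 3], [4, 5, 6], 7)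

def Spec_xor_convolution (f : List Int) (g : List Int) (MOD : Int) (out : List Int) : Prop :=
  out = xor_convolution_alt f g MOD
instance (f : List Int) (g : List Int) (MOD : Int) (out : List Int) :
    Decidable (Spec_xor_convolution f g MOD out) := by
  unfold Spec_xor_convolution; infer_instance

-- ===== CLAIM (what is proved, stated in full; the proofs are below) =====
def Claim_equal_xor_convolution : Prop := ∀ (f : List Int) (g : List Int) (MOD : Int), Dom_xor_convolution f g MOD → Pre_xor_convolution f g MOD → Spec_xor_convolution f g MOD (xor_convolution f g MOD)

-- ===== LEMMAS AND PROOFS =====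

-- ### Python-mod toolkit
theorem pmod_modEq (a M : Int) : PySem.Int.mod a M ≡ a [ZMOD M] := by
  have h := PySem.Int.floordiv_mul_add_mod a M
  exact Int.modEq_iff_dvd.2 ⟨PySem.Int.floordiv a M, by rw [Int.mul_comm]; omega⟩

theorem pmod_eq_of_modEq {M a b : Int} (hM : M ≠ 0) (h : a ≡ b [ZMOD M]) :
    PySem.Int.mod a M = PySem.Int.mod b M := by
  have hab : PySem.Int.mod a M ≡ PySem.Int.mod b M [ZMOD M] :=
    (pmod_modEq a M).trans (h.trans (pmod_modEq b M).symm)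
  have hd : M ∣ (PySem.Int.mod a M - PySem.Int.mod b M) := Int.ModEq.dvd hab.symm
  rcases lt_or_gt_of_ne hM with hneg | hpos
  · have b1 := PySem.Int.mod_neg_bounds a hneg
    have b2 := PySem.Int.mod_neg_bounds b hneg
    have := Int.eq_zero_of_abs_lt_dvd (neg_dvd.2 hd) (by rw [abs_lt]; omega)
    omega
  · have b1 := PySem.Int.mod_nonneg a hpos
    have b2 := PySem.Int.mod_lt a hpos
    have b3 := PySem.Int.mod_nonneg b hpos
    have b4 := PySem.Int.mod_lt b hpos
    have := Int.eq_zero_of_abs_lt_dvd hd (by rw [abs_lt]; omega)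
    omega

theorem pmod_pmod {M : Int} (hM : M ≠ 0) (a : Int) :
    PySem.Int.mod (PySem.Int.mod a M) M = PySem.Int.mod a M :=
  pmod_eq_of_modEq hM (pmod_modEq a M)

def pc (m : Nat) : Nat :=
  if m = 0 then 0 else m % 2 + pc (m / 2)
termination_by m
decreasing_by omega

theorem pc_zero : pc 0 = 0 := by rw [pc]; simp
theorem pc_step (m : Nat) : pc m = m % 2 + pc (m / 2) := by
  by_cases h : m = 0
  · subst h; simp [pc_zero]
  · rw [pc]; simp [h]

theorem pc_split (s : Nat) : ∀ y x, x < 2 ^ s → pc (2 ^ s * y + x) = pc y + pc x := by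
  induction s with
  | zero => intro y x hx; interval_cases x; simp [pc_zero]
  | succ s ih =>
    intro y x hx
    have e1 : 2 ^ (s+1) * y + x = 2 * (2 ^ s * y) + x := by ring
    rw [pc_step (2 ^ (s+1) * y + x), pc_step x, e1, Nat.mul_add_mod,
      Nat.mul_add_div (by omega)]
    rw [ih y (x / 2) (by omega)]
    omega

theorem pc_testBit_sum (k : Nat) : ∀ a, a < 2 ^ k →
    pc a = ∑ t ∈ Finset.range k, (if a.testBit t then 1 else 0) := by
  induction k with
  | zero => intro a ha; interval_cases a; simp [pc_zero]
  | succ k ih =>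
    intro a ha
    rw [pc_step, Finset.sum_range_succ']
    have hdt : ∀ t, a.testBit (t + 1) = (a / 2).testBit t := fun t => (Nat.testBit_div_two a t).symm
    simp only [hdt, Nat.testBit_zero]
    rw [← ih (a / 2) (by omega)]
    rcases Nat.mod_two_eq_zero_or_one a with h | h <;> simp [h] <;> omega

def sgn (i j : Nat) : Int := (-1) ^ (pc (i &&& j))

theorem sgn_zero_right (i : Nat) : sgn i 0 = 1 := by
  simp [sgn, pc_zero]

theorem testBit_one (u : Nat) : (1 : Nat).testBit u = decide (u = 0) := by
  rw [show (1:Nat) = 2 ^ 0 by rfl, Nat.testBit_two_pow]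
  simp [eq_comm]

theorem and_eq_mod_and (i j s : Nat) (hj : j < 2 ^ s) : i &&& j = (i % 2 ^ s) &&& j := by
  apply Nat.eq_of_testBit_eq
  intro t
  rw [Nat.testBit_and, Nat.testBit_and, Nat.testBit_mod_two_pow]
  by_cases h : t < s
  · simp [h]
  · have : j.testBit t = false :=
      Nat.testBit_eq_false_of_lt (lt_of_lt_of_le hj (Nat.pow_le_pow_right (by omega) (by omega)))
    simp [this]

theorem sgn_low (i j s : Nat) (hj : j < 2 ^ s) : sgn i j = sgn (i % 2 ^ s) j := by
  rw [sgn, sgn, and_eq_mod_and i j s hj]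

theorem and_add_pow (i j s : Nat) (hj : j < 2 ^ s) :
    i &&& (2 ^ s + j) = 2 ^ s * (if i.testBit s then 1 else 0) + (i &&& j) := by
  apply Nat.eq_of_testBit_eq
  intro t
  have hand : i &&& j < 2 ^ s := lt_of_le_of_lt Nat.and_le_right hj
  have hr := Nat.testBit_two_pow_mul_add (if i.testBit s then 1 else 0) hand t
  have hj' : (2 ^ s + j).testBit t = if t < s then j.testBit t else (1:Nat).testBit (t - s) := by
    rw [show 2 ^ s + j = 2 ^ s * 1 + j by ring]
    exact Nat.testBit_two_pow_mul_add 1 hj t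
  rw [Nat.testBit_and, hr, hj']
  by_cases h : t < s
  · simp [h, Nat.testBit_and]
  · simp only [if_neg h, testBit_one]
    by_cases hts : t - s = 0
    · have hts' : t = s := by omega
      subst hts'
      by_cases hi : i.testBit t <;> simp [hi, hts]
    · by_cases hi : i.testBit s <;> simp [hi, hts, testBit_one]

theorem sgn_add_pow (i j s : Nat) (hj : j < 2 ^ s) :
    sgn i (2 ^ s + j) = (if i.testBit s then -1 else 1) * sgn i j := by
  rw [sgn, sgn, and_add_pow i j s hj,
    pc_split s (if i.testBit s then 1 else 0) _ (lt_of_le_of_lt Nat.and_le_right hj)]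
  by_cases hi : i.testBit s
  · simp [hi, pc_step 1, pc_zero, pow_add]
  · simp [hi, pc_zero]

-- bit reversal on k bits
def rev (k j : Nat) : Nat :=
  match k with
  | 0 => 0
  | k + 1 => 2 ^ k * (j % 2) + rev k (j / 2)

theorem rev_lt (k : Nat) : ∀ j, rev k j < 2 ^ k := by
  induction k with
  | zero => intro j; simp [rev]
  | succ k ih =>
    intro j
    have := ih (j / 2)
    have h2 : j % 2 ≤ 1 := by omega
    have : 2 ^ k * (j % 2) ≤ 2 ^ k := by
      calc 2 ^ k * (j % 2) ≤ 2 ^ k * 1 := Nat.mul_le_mul_left _ h2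
      _ = 2 ^ k := by ring
    rw [rev, pow_succ]
    omega

theorem rev_testBit (k : Nat) : ∀ j t, (rev k j).testBit t =
    (decide (t < k) && j.testBit (k - 1 - t)) := by
  induction k with
  | zero => intro j t; simp [rev]
  | succ k ih =>
    intro j t
    rw [rev, Nat.testBit_two_pow_mul_add _ (rev_lt k (j / 2))]
    by_cases h : t < k
    · rw [if_pos h, ih]
      have e : k + 1 - 1 - t = (k - 1 - t) + 1 := by omega
      rw [e, ← Nat.testBit_div_two]
      simp [h, show t < k + 1 by omega]
    · rw [if_neg h]
      by_cases h2 : t = k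
      · subst h2
        have e0 : (j % 2).testBit (t - t) = j.testBit 0 := by
          simp [Nat.testBit_zero]
        rw [e0]
        simp [Nat.testBit_zero]
      · have : (j % 2).testBit (t - k) = false :=
          Nat.testBit_eq_false_of_lt (by
            have : j % 2 < 2 := by omega
            calc j % 2 < 2 := this
            _ = 2 ^ 1 := by norm_num
            _ ≤ 2 ^ (t - k) := Nat.pow_le_pow_right (by omega) (by omega))
        rw [this]
        simp; omega

theorem rev_rev (k j : Nat) (hj : j < 2 ^ k) : rev k (rev k j) = j := by
  apply Nat.eq_of_testBit_eq
  intro t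
  rw [rev_testBit, rev_testBit]
  by_cases h : t < k
  · simp [h, show k - 1 - t < k by omega, show k - 1 - (k - 1 - t) = t by omega]
  · have hf : j.testBit t = false :=
      Nat.testBit_eq_false_of_lt (lt_of_lt_of_le hj (Nat.pow_le_pow_right (by omega) (by omega)))
    simp [h, hf]

theorem rev_xor (k a b : Nat) : rev k (a ^^^ b) = rev k a ^^^ rev k b := by
  apply Nat.eq_of_testBit_eq
  intro t
  simp only [rev_testBit, Nat.testBit_xor]
  by_cases h : t < k <;> simp [h]

theorem rev_and (k a b : Nat) : rev k (a &&& b) = rev k a &&& rev k b := by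
  apply Nat.eq_of_testBit_eq
  intro t
  simp only [rev_testBit, Nat.testBit_and]
  by_cases h : t < k <;> simp [h]

theorem pc_rev (k a : Nat) (ha : a < 2 ^ k) : pc (rev k a) = pc a := by
  rw [pc_testBit_sum k _ (rev_lt k a), pc_testBit_sum k a ha]
  rw [← Finset.sum_range_reflect]
  apply Finset.sum_congr rfl
  intro t ht
  rw [Finset.mem_range] at ht
  rw [rev_testBit]
  simp [show k - 1 - t < k by omega, show k - 1 - (k - 1 - t) = t by omega]

theorem sgn_rev (k i j : Nat) (hi : i < 2 ^ k) (hj : j < 2 ^ k) :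
    sgn i (rev k j) = sgn (rev k i) j := by
  rw [sgn, sgn]
  congr 1
  have h1 : i &&& rev k j < 2 ^ k := lt_of_le_of_lt Nat.and_le_left hi
  rw [← pc_rev k _ h1, rev_and, rev_rev k j hj]

-- ### the pos-update of A's permutation pass is bit reversal
theorem xor_pred (s b : Nat) :
    (2 ^ (s+1) * b + 2 ^ s) ^^^ (2 ^ (s+1) * b + 2 ^ s - 1) = 2 ^ (s+1) - 1 := by
  have e : 2 ^ (s+1) * b + 2 ^ s - 1 = 2 ^ (s+1) * b + (2 ^ s - 1) := by
    have : 1 ≤ 2 ^ s := Nat.one_le_two_pow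
    omega
  rw [e]
  apply Nat.eq_of_testBit_eq
  intro t
  have h1 : 2 ^ s < 2 ^ (s+1) := Nat.pow_lt_pow_right (by omega) (by omega)
  have h2 : 2 ^ s - 1 < 2 ^ (s+1) := by omega
  rw [Nat.testBit_xor, Nat.testBit_two_pow_mul_add b h1, Nat.testBit_two_pow_mul_add b h2,
    Nat.testBit_two_pow_sub_one, Nat.testBit_two_pow, Nat.testBit_two_pow_sub_one]
  by_cases h : t < s + 1
  · by_cases h3 : t = s <;> simp [h, h3] <;> omega
  · simp [h, show ¬ s = t by omega, show ¬ t < s by omega]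

theorem and_pred (s b : Nat) :
    (2 ^ (s+1) * b + 2 ^ s) &&& (2 ^ (s+1) * b + 2 ^ s - 1) = 2 ^ (s+1) * b := by
  have e : 2 ^ (s+1) * b + 2 ^ s - 1 = 2 ^ (s+1) * b + (2 ^ s - 1) := by
    have : 1 ≤ 2 ^ s := Nat.one_le_two_pow
    omega
  rw [e]
  apply Nat.eq_of_testBit_eq
  intro t
  have h1 : 2 ^ s < 2 ^ (s+1) := Nat.pow_lt_pow_right (by omega) (by omega)
  have h2 : 2 ^ s - 1 < 2 ^ (s+1) := by omega
  have h0 : (0:Nat) < 2 ^ (s+1) := Nat.two_pow_pos _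
  rw [Nat.testBit_and, Nat.testBit_two_pow_mul_add b h1, Nat.testBit_two_pow_mul_add b h2,
    show 2 ^ (s+1) * b = 2 ^ (s+1) * b + 0 by omega,
    Nat.testBit_two_pow_mul_add b h0,
    Nat.testBit_two_pow, Nat.testBit_two_pow_sub_one]
  by_cases h : t < s + 1
  · by_cases h3 : t = s <;> simp [h, h3] <;> omega
  · simp [h]

-- ((m:Int) & -(m:Int)).toNat is m's lowest set bit, computed as m - (m & (m-1))
theorem band_neg_self (m : Nat) (hm : 1 ≤ m) :
    (PySem.Int.band (m : Int) (-(m : Int))).toNat = m - (m &&& (m - 1)) := by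
  rw [PySem.Int.band]
  have h1 : (0:Int) ≤ (m:Int) := by positivity
  have h2 : ¬ (0:Int) ≤ -(m:Int) := by omega
  rw [if_pos h1, if_neg h2]
  have e1 : (-(-(m:Int)) - 1).toNat = m - 1 := by omega
  have e2 : ((m:Int)).toNat = m := by omega
  rw [e1, e2]
  omega

theorem lowbit_decomp (m : Nat) (hm : 1 ≤ m) :
    ∃ s b, m = 2 ^ (s+1) * b + 2 ^ s := by
  obtain ⟨k, o, ho, he⟩ := Nat.exists_eq_two_pow_mul_odd (show m ≠ 0 by omega)
  obtain ⟨b, hb⟩ := ho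
  exact ⟨k, b, by rw [he, hb]; ring⟩

theorem rev_all_ones (k s : Nat) (hs : s < k) :
    rev k (2 ^ (s+1) - 1) = 2 ^ k - 2 ^ (k - s - 1) := by
  have hpow : 2 ^ (k - s - 1) * 2 ^ (s+1) = 2 ^ k := by
    rw [← pow_add]; congr 1; omega
  have e : 2 ^ (k - s - 1) * (2 ^ (s+1) - 1) + 0 = 2 ^ k - 2 ^ (k - s - 1) := by
    have h1 : 2 ^ (k - s - 1) * (2 ^ (s+1) - 1) + 2 ^ (k - s - 1) = 2 ^ (k - s - 1) * 2 ^ (s+1) := by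
      rw [← Nat.mul_succ]
      congr 1
      have : (1:Nat) ≤ 2 ^ (s+1) := Nat.one_le_two_pow
      omega
    omega
  apply Nat.eq_of_testBit_eq
  intro t
  rw [← e, Nat.testBit_two_pow_mul_add _ (Nat.two_pow_pos _), rev_testBit,
    Nat.testBit_two_pow_sub_one]
  by_cases h : t < k
  · simp [h, Nat.testBit_two_pow_sub_one]
    by_cases h2 : t < k - s - 1 <;> simp [h2] <;> omega
  · simp [h, show ¬ t < k - s - 1 by omega, Nat.testBit_two_pow_sub_one, show ¬ t - (k-s-1) < s+1 by omega]

-- one step of the incremental bit-reversal: pos(m) = pos(m-1) ^^^ mask(m)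
theorem pos_step (k m : Nat) (h1 : 1 ≤ m) (h2 : m < 2 ^ k) :
    rev k (m - 1) ^^^ ((2 ^ k - 1) &&& (2 ^ k - 2 ^ k / ((m - (m &&& (m - 1))) * 2))) = rev k m := by
  obtain ⟨s, b, hsb⟩ := lowbit_decomp m h1
  have hlow : m - (m &&& (m - 1)) = 2 ^ s := by
    rw [hsb, and_pred]
    have : 1 ≤ 2 ^ s := Nat.one_le_two_pow
    omega
  have hsk : s < k := by
    have : 2 ^ s ≤ m := by rw [hsb]; omega
    by_contra hc
    have : 2 ^ k ≤ 2 ^ s := Nat.pow_le_pow_right (by omega) (by omega)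
    omega
  have hdiv : 2 ^ k / ((m - (m &&& (m - 1))) * 2) = 2 ^ (k - s - 1) := by
    rw [hlow, show 2 ^ s * 2 = 2 ^ (s+1) by ring, Nat.pow_div (by omega) (by omega),
      Nat.sub_sub]
  have hmask : (2 ^ k - 1) &&& (2 ^ k - 2 ^ (k - s - 1)) = 2 ^ k - 2 ^ (k - s - 1) := by
    rw [Nat.and_comm, Nat.and_two_pow_sub_one_eq_mod]
    apply Nat.mod_eq_of_lt
    have : (1:Nat) ≤ 2 ^ (k - s - 1) := Nat.one_le_two_pow
    have : (1:Nat) ≤ 2 ^ k := Nat.one_le_two_pow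
    omega
  rw [hdiv, hmask, ← rev_all_ones k s hsk]
  have hx : m ^^^ (m - 1) = 2 ^ (s+1) - 1 := by rw [hsb]; exact xor_pred s b
  have hm1 : m - 1 < 2 ^ k := by omega
  rw [← rev_xor]
  congr 1
  have hc : (m - 1) ^^^ (m ^^^ (m - 1)) = m := by
    rw [Nat.xor_comm m (m-1), ← Nat.xor_assoc, Nat.xor_self, Nat.zero_xor]
  rw [← hx]
  exact hc

-- ### small list helpers
theorem getD_set_eq (l : List Int) (i : Nat) (v : Int) (h : i < l.length) :
    (l.set i v).getD i 0 = v := by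
  rw [List.getD_eq_getElem?_getD, List.getElem?_set_self (by simpa using h)]
  rfl

theorem getD_set_ne (l : List Int) (i j : Nat) (v : Int) (h : j ≠ i) :
    (l.set i v).getD j 0 = l.getD j 0 := by
  rw [List.getD_eq_getElem?_getD, List.getElem?_set_ne (by omega), ← List.getD_eq_getElem?_getD]

theorem getD_map_range (F : Nat → Int) (n i : Nat) (d : Int) :
    ((List.range n).map F).getD i d = if i < n then F i else d := by
  by_cases h : i < n
  · rw [List.getD_eq_getElem?_getD]
    simp [List.getElem?_map, List.getElem?_range, h]
  · rw [List.getD_eq_getElem?_getD, List.getElem?_eq_none (by simpa using by omega)]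
    simp [h]

theorem list_eq_of_getD (A B : List Int) (hlen : A.length = B.length)
    (h : ∀ i, i < A.length → A.getD i 0 = B.getD i 0) : A = B := by
  apply List.ext_getElem hlen
  intro i h1 h2
  have := h i h1
  rwa [List.getD_eq_getElem?_getD, List.getD_eq_getElem?_getD, List.getElem?_eq_getElem h1,
    List.getElem?_eq_getElem h2] at this

-- 'for i in range(n): xs[i] = F(i, xs[i])' rewrites exactly the prefix
theorem foldl_set_range (F : Nat → Int → Int) (l : List Int) :
    ∀ t, t ≤ l.length →
      (List.range t).foldl (fun acc i => acc.set i (F i (acc.getD i 0))) l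
        = (List.range t).map (fun i => F i (l.getD i 0)) ++ l.drop t := by
  intro t
  induction t with
  | zero => simp
  | succ t ih =>
    intro ht
    rw [List.range_succ, List.foldl_append, List.foldl_cons, List.foldl_nil, ih (by omega),
      List.map_append]
    have hlen : ((List.range t).map (fun i => F i (l.getD i 0))).length = t := by simp
    have hdrop : l.drop t = l[t] :: l.drop (t + 1) := List.drop_eq_getElem_cons (by omega)
    have hgetD : ((List.range t).map (fun i => F i (l.getD i 0)) ++ l.drop t).getD t 0
        = l.getD t 0 := by
      rw [List.getD_eq_getElem?_getD, List.getElem?_append_right (by omega), hlen, Nat.sub_self,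
        hdrop]
      rw [List.getElem?_cons_zero, List.getD_eq_getElem?_getD, List.getElem?_eq_getElem (by omega)]
      rfl
    rw [hgetD, List.set_append, if_neg (by omega), hlen, Nat.sub_self, hdrop,
      List.set_cons_zero]
    simp

-- ### butterfly folds
def bstep (M : Int) (acc : List Int) (p : Nat × Nat) : List Int :=
  (acc.set p.1 (PySem.Int.mod (acc.getD p.1 0 + acc.getD p.2 0) M)).set p.2
    (PySem.Int.mod (acc.getD p.1 0 - acc.getD p.2 0) M)

def bfold (M : Int) (ps : List (Nat × Nat)) (l : List Int) : List Int :=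
  ps.foldl (bstep M) l

def pSep (p q : Nat × Nat) : Prop := p.1 ≠ q.1 ∧ p.1 ≠ q.2 ∧ p.2 ≠ q.1 ∧ p.2 ≠ q.2

theorem bfold_append (M : Int) (ps qs : List (Nat × Nat)) (l : List Int) :
    bfold M (ps ++ qs) l = bfold M qs (bfold M ps l) := by
  rw [bfold, bfold, bfold, List.foldl_append]

theorem bstep_length (M : Int) (acc : List Int) (p : Nat × Nat) :
    (bstep M acc p).length = acc.length := by
  simp [bstep]

theorem bfold_length (M : Int) : ∀ (ps : List (Nat × Nat)) (l : List Int),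
    (bfold M ps l).length = l.length := by
  intro ps
  induction ps with
  | nil => intro l; rfl
  | cons p ps ih =>
    intro l
    rw [bfold, List.foldl_cons, ← bfold, ih, bstep_length]

theorem bstep_getD_fst (M : Int) (l : List Int) (p : Nat × Nat) (h1 : p.1 < l.length)
    (hne : p.1 ≠ p.2) :
    (bstep M l p).getD p.1 0 = PySem.Int.mod (l.getD p.1 0 + l.getD p.2 0) M := by
  rw [bstep, getD_set_ne _ _ _ _ hne, getD_set_eq _ _ _ h1]

theorem bstep_getD_snd (M : Int) (l : List Int) (p : Nat × Nat) (h2 : p.2 < l.length) :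
    (bstep M l p).getD p.2 0 = PySem.Int.mod (l.getD p.1 0 - l.getD p.2 0) M := by
  rw [bstep, getD_set_eq _ _ _ (by simpa using h2)]

theorem bstep_getD_other (M : Int) (l : List Int) (p : Nat × Nat) (i : Nat)
    (h1 : i ≠ p.1) (h2 : i ≠ p.2) : (bstep M l p).getD i 0 = l.getD i 0 := by
  rw [bstep, getD_set_ne _ _ _ _ h2, getD_set_ne _ _ _ _ h1]

-- pairwise-disjoint butterflies act pointwise
theorem bfold_sem (M : Int) : ∀ (ps : List (Nat × Nat)) (l : List Int),
    (∀ p ∈ ps, p.1 < l.length ∧ p.2 < l.length ∧ p.1 ≠ p.2) →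
    ps.Pairwise pSep →
    ((∀ i b, (i, b) ∈ ps →
        (bfold M ps l).getD i 0 = PySem.Int.mod (l.getD i 0 + l.getD b 0) M)
    ∧ (∀ a i, (a, i) ∈ ps →
        (bfold M ps l).getD i 0 = PySem.Int.mod (l.getD a 0 - l.getD i 0) M)
    ∧ (∀ i, (∀ p ∈ ps, i ≠ p.1 ∧ i ≠ p.2) → (bfold M ps l).getD i 0 = l.getD i 0)) := by
  intro ps
  induction ps with
  | nil => exact fun l _ _ => ⟨by simp, by simp, fun i _ => rfl⟩
  | cons p ps ih =>
    intro l hb hpw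
    rw [List.pairwise_cons] at hpw
    obtain ⟨hp, hpw'⟩ := hpw
    have hbp := hb p (List.mem_cons_self)
    have hb' : ∀ q ∈ ps, q.1 < (bstep M l p).length ∧ q.2 < (bstep M l p).length ∧ q.1 ≠ q.2 := by
      intro q hq
      rw [bstep_length]
      exact hb q (List.mem_cons_of_mem _ hq)
    have hfold : bfold M (p :: ps) l = bfold M ps (bstep M l p) := by
      rw [bfold, List.foldl_cons, ← bfold]
    obtain ⟨ih1, ih2, ih3⟩ := ih (bstep M l p) hb' hpw'
    have hpres : ∀ q ∈ ps, ∀ x, (x = q.1 ∨ x = q.2) →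
        (bstep M l p).getD x 0 = l.getD x 0 := by
      intro q hq x hx
      have := hp q hq
      rw [pSep] at this
      apply bstep_getD_other
      · rcases hx with h | h <;> subst h <;> [exact fun hc => this.1 hc.symm;
          exact fun hc => this.2.1 hc.symm]
      · rcases hx with h | h <;> subst h <;> [exact fun hc => this.2.2.1 hc.symm;
          exact fun hc => this.2.2.2 hc.symm]
    refine ⟨?_, ?_, ?_⟩
    · intro i b hmem
      rw [hfold]
      rcases List.mem_cons.1 hmem with heq | hmem'
      · have hi : i = p.1 := by rw [← heq]
        have hbb : b = p.2 := by rw [← heq]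
        subst hi; subst hbb
        rw [ih3 p.1 (fun q hq => by
          have := hp q hq; rw [pSep] at this
          exact ⟨this.1, this.2.1⟩)]
        exact bstep_getD_fst M l p hbp.1 hbp.2.2
      · rw [ih1 i b hmem', hpres _ hmem' i (Or.inl rfl), hpres _ hmem' b (Or.inr rfl)]
    · intro a i hmem
      rw [hfold]
      rcases List.mem_cons.1 hmem with heq | hmem'
      · have ha : a = p.1 := by rw [← heq]
        have hi : i = p.2 := by rw [← heq]
        subst ha; subst hi
        rw [ih3 p.2 (fun q hq => by
          have := hp q hq; rw [pSep] at this
          exact ⟨this.2.2.1, this.2.2.2⟩)]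
        exact bstep_getD_snd M l p hbp.2.1
      · rw [ih2 a i hmem', hpres _ hmem' a (Or.inl rfl), hpres _ hmem' i (Or.inr rfl)]
    · intro i hi
      rw [hfold, ih3 i (fun q hq => hi q (List.mem_cons_of_mem _ hq)),
        bstep_getD_other M l p i (hi p List.mem_cons_self).1 (hi p List.mem_cons_self).2]

theorem pairwise_flatMap {α β : Type} (R : β → β → Prop) (f : α → List β) (l : List α)
    (h1 : ∀ x ∈ l, (f x).Pairwise R)
    (h2 : l.Pairwise (fun x y => ∀ b ∈ f x, ∀ c ∈ f y, R b c)) :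
    (l.flatMap f).Pairwise R := by
  induction l with
  | nil => simp
  | cons x l ih =>
    rw [List.pairwise_cons] at h2
    rw [List.flatMap_cons, List.pairwise_append]
    refine ⟨h1 x List.mem_cons_self, ih (fun y hy => h1 y (List.mem_cons_of_mem _ hy)) h2.2, ?_⟩
    intro a ha b hb
    rw [List.mem_flatMap] at hb
    obtain ⟨y, hy, hby⟩ := hb
    exact h2.1 y hy a ha b hby

-- unique base-2^s decomposition k + r*2^s + t*2^(s+1)
theorem decomp_ne (E k1 k2 r1 r2 t1 t2 : Nat) (h1 : k1 < E) (h2 : k2 < E)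
    (hr1 : r1 < 2) (hr2 : r2 < 2) (hne : ¬(k1 = k2 ∧ r1 = r2 ∧ t1 = t2)) :
    k1 + r1 * E + t1 * (2 * E) ≠ k2 + r2 * E + t2 * (2 * E) := by
  intro h
  have e1 : k1 + r1 * E + t1 * (2 * E) = k1 + E * (r1 + 2 * t1) := by ring
  have e2 : k2 + r2 * E + t2 * (2 * E) = k2 + E * (r2 + 2 * t2) := by ring
  rw [e1, e2] at h
  have hE : 0 < E := by omega
  have hk : k1 = k2 := by
    have h1' : (k1 + E * (r1 + 2 * t1)) % E = k1 := by
      rw [Nat.add_mul_mod_self_left]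
      exact Nat.mod_eq_of_lt h1
    have h2' : (k2 + E * (r2 + 2 * t2)) % E = k2 := by
      rw [Nat.add_mul_mod_self_left]
      exact Nat.mod_eq_of_lt h2
    rw [← h1', ← h2', h]
  subst hk
  have hx : r1 + 2 * t1 = r2 + 2 * t2 := Nat.eq_of_mul_eq_mul_left hE (by omega)
  omega

-- ### A's inner/outer butterfly loops are a butterfly fold
theorem innerLoop (M : Int) (left : Nat) : ∀ (T : Nat) (res : List Int) (il ir : Nat),
    (List.range T).foldl (fun (st2 : List Int × Nat × Nat) _j =>
        ((st2.1.set st2.2.1 (PySem.Int.mod (st2.1.getD st2.2.1 0 + st2.1.getD st2.2.2 0) M)).set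
            st2.2.2 (PySem.Int.mod (st2.1.getD st2.2.1 0 - st2.1.getD st2.2.2 0) M),
         st2.2.1 + left, st2.2.2 + left)) (res, il, ir)
      = (bfold M ((List.range T).map (fun t => (il + t * left, ir + t * left))) res,
         il + T * left, ir + T * left) := by
  intro T
  induction T with
  | zero => intro res il ir; simp [bfold]
  | succ T ih =>
    intro res il ir
    rw [List.range_succ, List.foldl_append, ih, List.foldl_cons, List.foldl_nil,
      List.map_append, bfold_append]
    simp only [List.map_cons, List.map_nil, bfold, List.foldl_cons, List.foldl_nil, bstep]
    rw [Nat.succ_mul]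
    refine congrArg₂ _ rfl ?_
    rw [Prod.mk.injEq]
    constructor <;> omega

theorem rowLoop (M : Int) (left thgir right : Nat) : ∀ (r : Nat) (res : List Int),
    (List.range r).foldl (fun res k =>
        ((List.range thgir).foldl (fun (st2 : List Int × Nat × Nat) _j =>
          ((st2.1.set st2.2.1 (PySem.Int.mod (st2.1.getD st2.2.1 0 + st2.1.getD st2.2.2 0) M)).set
              st2.2.2 (PySem.Int.mod (st2.1.getD st2.2.1 0 - st2.1.getD st2.2.2 0) M),
           st2.2.1 + left, st2.2.2 + left)) (res, k, k + right)).1) res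
      = bfold M ((List.range r).flatMap (fun k =>
          (List.range thgir).map (fun t => (k + t * left, (k + right) + t * left)))) res := by
  intro r
  induction r with
  | zero => intro res; simp [bfold]
  | succ r ih =>
    intro res
    rw [List.range_succ, List.foldl_append, List.foldl_cons, List.foldl_nil, ih,
      List.flatMap_append, bfold_append, List.flatMap_cons, List.flatMap_nil, List.append_nil,
      innerLoop]

-- ### one butterfly stage, index form
def stage (s n : Nat) (M : Int) (l : List Int) : List Int :=
  (List.range n).map (fun i =>
    if i.testBit s then PySem.Int.mod (l.getD (i - 2 ^ s) 0 - l.getD i 0) M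
    else PySem.Int.mod (l.getD i 0 + l.getD (i + 2 ^ s) 0) M)

theorem stage_length (s n : Nat) (M : Int) (l : List Int) : (stage s n M l).length = n := by
  simp [stage]

theorem stage_bfold (M : Int) (k s : Nat) (hs : s < k) (l : List Int) (hl : l.length = 2 ^ k) :
    bfold M ((List.range (2 ^ s)).flatMap (fun k' =>
        (List.range (2 ^ (k - s - 1))).map (fun t =>
          (k' + t * 2 ^ (s + 1), (k' + 2 ^ s) + t * 2 ^ (s + 1))))) l
      = stage s (2 ^ k) M l := by
  have hE : 0 < 2 ^ s := Nat.two_pow_pos s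
  have hL2 : 2 ^ (s + 1) = 2 ^ s * 2 := pow_succ 2 s
  have hTL : 2 ^ (k - s - 1) * 2 ^ (s + 1) = 2 ^ k := by
    rw [← pow_add]; congr 1; omega
  have hLpos : 0 < 2 ^ (s + 1) := Nat.two_pow_pos _
  have hmulbound : ∀ t, t < 2 ^ (k - s - 1) → t * 2 ^ (s + 1) + 2 ^ (s + 1) ≤ 2 ^ k := by
    intro t ht
    have h := Nat.mul_le_mul_right (2 ^ (s + 1)) (show t + 1 ≤ 2 ^ (k - s - 1) by omega)
    rw [Nat.succ_mul] at h
    omega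
  have hne4 : ∀ k1 k2 r1 r2 t1 t2 : Nat, k1 < 2 ^ s → k2 < 2 ^ s → r1 < 2 → r2 < 2 →
      ¬(k1 = k2 ∧ r1 = r2 ∧ t1 = t2) →
      (k1 + r1 * 2 ^ s) + t1 * 2 ^ (s + 1) ≠ (k2 + r2 * 2 ^ s) + t2 * 2 ^ (s + 1) := by
    intro k1 k2 r1 r2 t1 t2 h1 h2 hr1 hr2 hne
    have e1 : (k1 + r1 * 2 ^ s) + t1 * 2 ^ (s + 1) = k1 + r1 * 2 ^ s + t1 * (2 * 2 ^ s) := by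
      rw [hL2]; ring
    have e2 : (k2 + r2 * 2 ^ s) + t2 * 2 ^ (s + 1) = k2 + r2 * 2 ^ s + t2 * (2 * 2 ^ s) := by
      rw [hL2]; ring
    rw [e1, e2]
    exact decomp_ne (2 ^ s) k1 k2 r1 r2 t1 t2 h1 h2 hr1 hr2 hne
  have hsep : ∀ k1 k2 t1 t2 : Nat, k1 < 2 ^ s → k2 < 2 ^ s →
      ¬(k1 = k2 ∧ t1 = t2) →
      pSep (k1 + t1 * 2 ^ (s + 1), (k1 + 2 ^ s) + t1 * 2 ^ (s + 1))
        (k2 + t2 * 2 ^ (s + 1), (k2 + 2 ^ s) + t2 * 2 ^ (s + 1)) := by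
    intro k1 k2 t1 t2 h1 h2 hne
    have z1 : k1 + t1 * 2 ^ (s + 1) = (k1 + 0 * 2 ^ s) + t1 * 2 ^ (s + 1) := by ring
    have z2 : k2 + t2 * 2 ^ (s + 1) = (k2 + 0 * 2 ^ s) + t2 * 2 ^ (s + 1) := by ring
    have o1 : (k1 + 2 ^ s) + t1 * 2 ^ (s + 1) = (k1 + 1 * 2 ^ s) + t1 * 2 ^ (s + 1) := by ring
    have o2 : (k2 + 2 ^ s) + t2 * 2 ^ (s + 1) = (k2 + 1 * 2 ^ s) + t2 * 2 ^ (s + 1) := by ring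
    refine ⟨?_, ?_, ?_, ?_⟩
    · rw [z1, z2]; exact hne4 k1 k2 0 0 t1 t2 h1 h2 (by omega) (by omega) (by omega)
    · rw [z1, o2]; exact hne4 k1 k2 0 1 t1 t2 h1 h2 (by omega) (by omega) (by omega)
    · rw [o1, z2]; exact hne4 k1 k2 1 0 t1 t2 h1 h2 (by omega) (by omega) (by omega)
    · rw [o1, o2]; exact hne4 k1 k2 1 1 t1 t2 h1 h2 (by omega) (by omega) (by omega)
  have hbnd : ∀ p ∈ (List.range (2 ^ s)).flatMap (fun k' =>
      (List.range (2 ^ (k - s - 1))).map (fun t =>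
        (k' + t * 2 ^ (s + 1), (k' + 2 ^ s) + t * 2 ^ (s + 1)))),
      p.1 < l.length ∧ p.2 < l.length ∧ p.1 ≠ p.2 := by
    intro p hp
    rw [List.mem_flatMap] at hp
    obtain ⟨k', hk', hp⟩ := hp
    rw [List.mem_map] at hp
    obtain ⟨t, ht, rfl⟩ := hp
    rw [List.mem_range] at hk' ht
    have := hmulbound t ht
    simp only [hl]
    refine ⟨by omega, by omega, by omega⟩
  have hpw : ((List.range (2 ^ s)).flatMap (fun k' =>
      (List.range (2 ^ (k - s - 1))).map (fun t =>
        (k' + t * 2 ^ (s + 1), (k' + 2 ^ s) + t * 2 ^ (s + 1))))).Pairwise pSep := by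
    apply pairwise_flatMap
    · intro k' hk'
      rw [List.mem_range] at hk'
      rw [List.pairwise_map]
      refine List.Pairwise.imp_of_mem ?_ List.pairwise_lt_range
      intro t1 t2 h1 h2 hlt
      exact hsep k' k' t1 t2 hk' hk' (by omega)
    · refine List.Pairwise.imp_of_mem ?_ List.pairwise_lt_range
      intro k1 k2 hm1 hm2 hlt b hb c hc
      rw [List.mem_range] at hm1 hm2
      rw [List.mem_map] at hb hc
      obtain ⟨t1, ht1, rfl⟩ := hb
      obtain ⟨t2, ht2, rfl⟩ := hc
      exact hsep k1 k2 t1 t2 hm1 hm2 (by omega)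
  obtain ⟨sem1, sem2, _⟩ := bfold_sem M _ l hbnd hpw
  apply list_eq_of_getD
  · rw [bfold_length, stage_length, hl]
  · intro i hibnd
    rw [bfold_length, hl] at hibnd
    have hstage : (stage s (2 ^ k) M l).getD i 0 =
        (if i.testBit s then PySem.Int.mod (l.getD (i - 2 ^ s) 0 - l.getD i 0) M
         else PySem.Int.mod (l.getD i 0 + l.getD (i + 2 ^ s) 0) M) := by
      rw [stage, getD_map_range, if_pos hibnd]
    have hmod : i % 2 ^ (s + 1) = i % 2 ^ s + 2 ^ s * (i / 2 ^ s % 2) := by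
      rw [hL2, Nat.mod_mul]
    have hdm : i / 2 ^ (s + 1) * 2 ^ (s + 1) + i % 2 ^ (s + 1) = i := Nat.div_add_mod' i _
    have ht : i / 2 ^ (s + 1) < 2 ^ (k - s - 1) := by
      rw [Nat.div_lt_iff_lt_mul hLpos]
      calc i < 2 ^ k := hibnd
      _ = 2 ^ (k - s - 1) * 2 ^ (s + 1) := hTL.symm
    have hmE : i % 2 ^ s < 2 ^ s := Nat.mod_lt _ hE
    have hbit : i.testBit s = decide (i / 2 ^ s % 2 = 1) := Nat.testBit_eq_decide_div_mod_eq
    by_cases cb : i.testBit s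
    · rw [hstage, if_pos cb]
      have hb1 : i / 2 ^ s % 2 = 1 := by
        rw [hbit] at cb; simpa using cb
      have hmod' : i % 2 ^ (s + 1) = i % 2 ^ s + 2 ^ s := by
        rw [hmod, hb1]; ring
      have hpair : ((i - 2 ^ s), i) ∈ (List.range (2 ^ s)).flatMap (fun k' =>
          (List.range (2 ^ (k - s - 1))).map (fun t =>
            (k' + t * 2 ^ (s + 1), (k' + 2 ^ s) + t * 2 ^ (s + 1)))) := by
        rw [List.mem_flatMap]
        refine ⟨i % 2 ^ s, List.mem_range.2 hmE, ?_⟩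
        rw [List.mem_map]
        refine ⟨i / 2 ^ (s + 1), List.mem_range.2 ht, ?_⟩
        have e1 : i % 2 ^ s + i / 2 ^ (s + 1) * 2 ^ (s + 1) = i - 2 ^ s := by omega
      
        have e2 : (i % 2 ^ s + 2 ^ s) + i / 2 ^ (s + 1) * 2 ^ (s + 1) = i := by omega
        rw [Prod.mk.injEq]
        exact ⟨e1, e2⟩
      exact sem2 _ _ hpair
    · rw [hstage, if_neg cb]
      have hb0 : i / 2 ^ s % 2 = 0 := by
        rw [hbit] at cb; simpa using cb
      have hmod' : i % 2 ^ (s + 1) = i % 2 ^ s := by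
        rw [hmod, hb0]; ring
      have hpair : (i, i + 2 ^ s) ∈ (List.range (2 ^ s)).flatMap (fun k' =>
          (List.range (2 ^ (k - s - 1))).map (fun t =>
            (k' + t * 2 ^ (s + 1), (k' + 2 ^ s) + t * 2 ^ (s + 1)))) := by
        rw [List.mem_flatMap]
        refine ⟨i % 2 ^ s, List.mem_range.2 hmE, ?_⟩
        rw [List.mem_map]
        refine ⟨i / 2 ^ (s + 1), List.mem_range.2 ht, ?_⟩
        have e1 : i % 2 ^ s + i / 2 ^ (s + 1) * 2 ^ (s + 1) = i := by omega
        have e2 : (i % 2 ^ s + 2 ^ s) + i / 2 ^ (s + 1) * 2 ^ (s + 1) = i + 2 ^ s := by omega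
        rw [Prod.mk.injEq]
        exact ⟨e1, e2⟩
      exact sem1 _ _ hpair

def stageIter (M : Int) (n : Nat) : Nat → List Int → List Int
  | 0, l => l
  | s + 1, l => stage s n M (stageIter M n s l)

theorem stageIter_length (M : Int) (n s : Nat) (l : List Int) (hs : 1 ≤ s) :
    (stageIter M n s l).length = n := by
  cases s with
  | zero => omega
  | succ s => rw [stageIter, stage_length]

theorem sum_range_split (F : ℕ → Int) (a b : ℕ) :
    (∑ j ∈ Finset.range (a + b), F j)
      = (∑ j ∈ Finset.range a, F j) + ∑ j ∈ Finset.range b, F (a + j) := by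
  induction b with
  | zero => simp
  | succ b ih =>
    rw [show a + (b + 1) = (a + b) + 1 by omega, Finset.sum_range_succ, ih,
      Finset.sum_range_succ]
    ring

theorem stageIter_spec (M : Int) (hM : M ≠ 0) (k : Nat) (r : List Int) (hr : r.length = 2 ^ k) :
    ∀ s, 1 ≤ s → s ≤ k → ∀ i, i < 2 ^ k →
      (stageIter M (2 ^ k) s r).getD i 0
        = PySem.Int.mod
            (∑ j ∈ Finset.range (2 ^ s), sgn i j * r.getD (i / 2 ^ s * 2 ^ s + j) 0) M := by
  intro s
  induction s with
  | zero => omega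
  | succ s ih =>
    intro _ hsk i hi
    rw [stageIter]
    cases Nat.eq_or_lt_of_le (show 1 ≤ s + 1 from by omega) with
    | inl hs1 =>
      -- lowest stage (s = 0)
      have hs0 : s = 0 := by omega
      subst hs0
      rw [stageIter, stage, getD_map_range, if_pos hi]
      have hbit : i.testBit 0 = decide (i % 2 = 1) := by
        rw [Nat.testBit_eq_decide_div_mod_eq]
        norm_num
      have hsum : (∑ j ∈ Finset.range (2 ^ 1), sgn i j * r.getD (i / 2 ^ 1 * 2 ^ 1 + j) 0)
          = r.getD (i / 2 * 2) 0 + sgn i 1 * r.getD (i / 2 * 2 + 1) 0 := by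
        norm_num [Finset.sum_range_succ, sgn_zero_right]
      have hand1 : i &&& 1 = i % 2 := Nat.and_one_is_mod i
      by_cases cb : i % 2 = 1
      · rw [if_pos (by rw [hbit]; simpa using cb)]
        have hsg : sgn i 1 = -1 := by
          rw [sgn, hand1, cb, pc_step, pc_zero]
          norm_num
        rw [hsum, hsg, show i / 2 * 2 = i - 1 by omega, show i - 1 + 1 = i by omega]
        congr 1
        ring
      · rw [if_neg (by rw [hbit]; simpa using cb)]
        have hsg : sgn i 1 = 1 := by
          rw [sgn, hand1, show i % 2 = 0 by omega, pc_zero]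
          norm_num
        rw [hsum, hsg, show i / 2 * 2 = i by omega]
        norm_num
    | inr hs1 =>
      -- stage s ≥ 1 on top of the established invariant
      have hs : 1 ≤ s := by omega
      have hE : 0 < 2 ^ s := Nat.two_pow_pos s
      have hL2 : 2 ^ (s + 1) = 2 ^ s * 2 := pow_succ 2 s
      have hLpos : 0 < 2 ^ (s + 1) := Nat.two_pow_pos _
      have hVlen : (stageIter M (2 ^ k) s r).length = 2 ^ k := stageIter_length _ _ _ _ hs
      rw [stage, getD_map_range, if_pos (by omega)]
      have hbit : i.testBit s = decide (i / 2 ^ s % 2 = 1) := Nat.testBit_eq_decide_div_mod_eq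
      have hmod : i % 2 ^ (s + 1) = i % 2 ^ s + 2 ^ s * (i / 2 ^ s % 2) := by
        rw [hL2, Nat.mod_mul]
      have hdm : i / 2 ^ (s + 1) * 2 ^ (s + 1) + i % 2 ^ (s + 1) = i := Nat.div_add_mod' i _
      have hdm2 : i / 2 ^ s * 2 ^ s + i % 2 ^ s = i := Nat.div_add_mod' i _
      have ht : i / 2 ^ (s + 1) < 2 ^ (k - s - 1) := by
        rw [Nat.div_lt_iff_lt_mul hLpos]
        calc i < 2 ^ k := hi
        _ = 2 ^ (k - s - 1) * 2 ^ (s + 1) := by rw [← pow_add]; congr 1; omega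
      have hmE : i % 2 ^ s < 2 ^ s := Nat.mod_lt _ hE
      have htop : i / 2 ^ (s + 1) * 2 ^ (s + 1) + 2 ^ (s + 1) ≤ 2 ^ k := by
        have h := Nat.mul_le_mul_right (2 ^ (s + 1))
          (show i / 2 ^ (s + 1) + 1 ≤ 2 ^ (k - s - 1) by omega)
        rw [Nat.succ_mul] at h
        calc i / 2 ^ (s + 1) * 2 ^ (s + 1) + 2 ^ (s + 1) ≤ 2 ^ (k - s - 1) * 2 ^ (s + 1) := h
        _ = 2 ^ k := by rw [← pow_add]; congr 1; omega
      have hdd : i / 2 ^ s / 2 = i / 2 ^ (s + 1) := by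
        rw [Nat.div_div_eq_div_mul, ← hL2]
      have hA : i / 2 ^ (s + 1) * 2 ^ (s + 1) = 2 * (i / 2 ^ (s + 1)) * 2 ^ s := by
        rw [hL2]; ring
      have hEE : 2 ^ (s + 1) = 2 ^ s + 2 ^ s := by rw [hL2]; ring
      -- abbreviations (atoms)
      have hmodm : (i % 2 ^ s + 2 * (i / 2 ^ (s + 1)) * 2 ^ s) % 2 ^ s = i % 2 ^ s := by
        rw [show 2 * (i / 2 ^ (s + 1)) * 2 ^ s = (2 * (i / 2 ^ (s + 1))) * 2 ^ s by ring,
          Nat.add_mul_mod_self_right]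
        exact Nat.mod_mod_of_dvd _ dvd_rfl
      by_cases cb : i.testBit s
      · rw [if_pos cb]
        have hb1 : i / 2 ^ s % 2 = 1 := by rw [hbit] at cb; simpa using cb
        have hq : i / 2 ^ s = 2 * (i / 2 ^ (s + 1)) + 1 := by omega
        have hIdx2 : i / 2 ^ s * 2 ^ s = 2 * (i / 2 ^ (s + 1)) * 2 ^ s + 2 ^ s := by
          rw [hq]; ring
        have heq : i = 2 * (i / 2 ^ (s + 1)) * 2 ^ s + 2 ^ s + i % 2 ^ s := by omega
        have hsubq : (i - 2 ^ s) / 2 ^ s = 2 * (i / 2 ^ (s + 1)) := by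
          rw [show i - 2 ^ s = i % 2 ^ s + 2 * (i / 2 ^ (s + 1)) * 2 ^ s by omega,
            Nat.add_mul_div_right _ _ hE, Nat.div_eq_of_lt hmE]
          omega
        have hsubm : (i - 2 ^ s) % 2 ^ s = i % 2 ^ s := by
          rw [show i - 2 ^ s = i % 2 ^ s + 2 * (i / 2 ^ (s + 1)) * 2 ^ s by omega, hmodm]
        have hsubidx : (i - 2 ^ s) / 2 ^ s * 2 ^ s = 2 * (i / 2 ^ (s + 1)) * 2 ^ s := by
          rw [hsubq]
        have hVsub := ih hs (by omega) (i - 2 ^ s) (by omega)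
        have hVi := ih hs (by omega) i hi
        rw [hVsub, hVi, hsubidx, hIdx2]
        rw [pmod_eq_of_modEq hM ((pmod_modEq _ M).sub (pmod_modEq _ M))]
        apply congrArg (fun z => PySem.Int.mod z M)
        have hsplit := sum_range_split
          (fun j => sgn i j * r.getD (i / 2 ^ (s + 1) * 2 ^ (s + 1) + j) 0) (2 ^ s) (2 ^ s)
        rw [← hEE] at hsplit
        rw [hsplit, hA]
        have hfix1 : ∀ j ∈ Finset.range (2 ^ s),
            sgn (i - 2 ^ s) j * r.getD (2 * (i / 2 ^ (s + 1)) * 2 ^ s + j) 0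
              = sgn i j * r.getD (2 * (i / 2 ^ (s + 1)) * 2 ^ s + j) 0 := by
          intro j hj
          rw [Finset.mem_range] at hj
          rw [sgn_low _ j s hj, sgn_low i j s hj, hsubm]
        have hfix2 : ∀ j ∈ Finset.range (2 ^ s),
            sgn i (2 ^ s + j) * r.getD (2 * (i / 2 ^ (s + 1)) * 2 ^ s + (2 ^ s + j)) 0
              = -(sgn i j * r.getD (2 * (i / 2 ^ (s + 1)) * 2 ^ s + 2 ^ s + j) 0) := by
          intro j hj
          rw [Finset.mem_range] at hj
          rw [sgn_add_pow i j s hj, if_pos cb,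
            show 2 * (i / 2 ^ (s + 1)) * 2 ^ s + (2 ^ s + j)
              = 2 * (i / 2 ^ (s + 1)) * 2 ^ s + 2 ^ s + j by omega]
          ring
        rw [Finset.sum_congr rfl hfix1, Finset.sum_congr rfl hfix2, Finset.sum_neg_distrib]
        ring
      · rw [if_neg cb]
        have hb0 : i / 2 ^ s % 2 = 0 := by rw [hbit] at cb; simpa using cb
        have hq : i / 2 ^ s = 2 * (i / 2 ^ (s + 1)) := by omega
        have hIdx2 : i / 2 ^ s * 2 ^ s = 2 * (i / 2 ^ (s + 1)) * 2 ^ s := by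
          rw [hq]
        have heq : i = 2 * (i / 2 ^ (s + 1)) * 2 ^ s + i % 2 ^ s := by omega
        have haddq : (i + 2 ^ s) / 2 ^ s = 2 * (i / 2 ^ (s + 1)) + 1 := by
          rw [show i + 2 ^ s = i % 2 ^ s + (2 * (i / 2 ^ (s + 1)) + 1) * 2 ^ s by
              rw [Nat.succ_mul]; omega,
            Nat.add_mul_div_right _ _ hE, Nat.div_eq_of_lt hmE]
          omega
        have haddm : (i + 2 ^ s) % 2 ^ s = i % 2 ^ s := by
          rw [Nat.add_mod_right]
        have haddidx : (i + 2 ^ s) / 2 ^ s * 2 ^ s = 2 * (i / 2 ^ (s + 1)) * 2 ^ s + 2 ^ s := by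
          rw [haddq]; ring
        have hlt : i + 2 ^ s < 2 ^ k := by omega
        have hVadd := ih hs (by omega) (i + 2 ^ s) hlt
        have hVi := ih hs (by omega) i hi
        rw [hVadd, hVi, haddidx, hIdx2]
        rw [pmod_eq_of_modEq hM ((pmod_modEq _ M).add (pmod_modEq _ M))]
        apply congrArg (fun z => PySem.Int.mod z M)
        have hsplit := sum_range_split
          (fun j => sgn i j * r.getD (i / 2 ^ (s + 1) * 2 ^ (s + 1) + j) 0) (2 ^ s) (2 ^ s)
        rw [← hEE] at hsplit
        rw [hsplit, hA]
        have hfix1 : ∀ j ∈ Finset.range (2 ^ s),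
            sgn (i + 2 ^ s) j * r.getD (2 * (i / 2 ^ (s + 1)) * 2 ^ s + 2 ^ s + j) 0
              = sgn i j * r.getD (2 * (i / 2 ^ (s + 1)) * 2 ^ s + 2 ^ s + j) 0 := by
          intro j hj
          rw [Finset.mem_range] at hj
          rw [sgn_low _ j s hj, sgn_low i j s hj, haddm]
        have hfix2 : ∀ j ∈ Finset.range (2 ^ s),
            sgn i (2 ^ s + j) * r.getD (2 * (i / 2 ^ (s + 1)) * 2 ^ s + (2 ^ s + j)) 0
              = sgn i j * r.getD (2 * (i / 2 ^ (s + 1)) * 2 ^ s + 2 ^ s + j) 0 := by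
          intro j hj
          rw [Finset.mem_range] at hj
          rw [sgn_add_pow i j s hj, if_neg cb,
            show 2 * (i / 2 ^ (s + 1)) * 2 ^ s + (2 ^ s + j)
              = 2 * (i / 2 ^ (s + 1)) * 2 ^ s + 2 ^ s + j by omega]
          ring
        rw [Finset.sum_congr rfl hfix1, Finset.sum_congr rfl hfix2]

theorem rev_zero (k : Nat) : rev k 0 = 0 := by
  induction k with
  | zero => rfl
  | succ k ih => rw [rev]; simp [ih]

-- A's permutation pass writes f in bit-reversed order
theorem fhtPerm_inv (f : List Int) (k n : Nat) (hn : n = 2 ^ k) :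
    ∀ t, t ≤ n →
      ∃ p, (List.range t).foldl (fun (st : List Int × Nat) i =>
          (st.1.set i (f.getD st.2 0),
           st.2 ^^^ ((n - 1) &&&
             (n - n / ((PySem.Int.band ((i : Int) + 1) (-((i : Int) + 1))).toNat <<< 1)))))
          (List.replicate n 0, 0)
        = ((List.range t).map (fun i => f.getD (rev k i) 0) ++ List.replicate (n - t) 0, p)
        ∧ (t < n → p = rev k t) := by
  subst hn
  intro t
  induction t with
  | zero =>
    intro _
    exact ⟨0, by simp, fun _ => (rev_zero k).symm⟩
  | succ t ih =>
    intro ht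
    obtain ⟨p, hfold, hpos⟩ := ih (by omega)
    have htn : t < 2 ^ k := by omega
    have hp : p = rev k t := hpos htn
    rw [List.range_succ, List.foldl_append, List.foldl_cons, List.foldl_nil, hfold]
    dsimp only
    refine ⟨p ^^^ ((2 ^ k - 1) &&&
      (2 ^ k - 2 ^ k / ((PySem.Int.band ((t : Int) + 1) (-((t : Int) + 1))).toNat <<< 1))),
      ?_, ?_⟩
    · refine congrArg₂ Prod.mk ?_ rfl
      rw [hp, List.set_append, if_neg (by simp), List.length_map, List.length_range,
        Nat.sub_self, show 2 ^ k - t = (2 ^ k - (t + 1)) + 1 by omega, List.replicate_succ,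
        List.set_cons_zero, List.map_append]
      simp
    · intro htn1
      have hband : (PySem.Int.band ((t : Int) + 1) (-((t : Int) + 1))).toNat
          = (t + 1) - ((t + 1) &&& ((t + 1) - 1)) := by
        have e : ((t : Int) + 1) = (((t + 1 : Nat)) : Int) := by push_cast; ring
        rw [e, band_neg_self (t + 1) (by omega)]
      have hshift : ∀ a : Nat, a <<< 1 = a * 2 := by
        intro a
        rw [Nat.shiftLeft_eq]
      rw [hp, hband, hshift, show (t + 1) - 1 = t by omega]
      exact pos_step k (t + 1) (by omega) (by omega)

theorem shiftRight_one (a : Nat) : a >>> 1 = a / 2 := by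
  rw [show (1:Nat) = 0 + 1 by omega, Nat.shiftRight_succ, Nat.shiftRight_zero]

theorem fhtStages_inv (M : Int) (k : Nat) (r : List Int) (hr : r.length = 2 ^ k) :
    ∀ d, d ≤ k →
      fhtStages M d (2 ^ k) r
        = (stageIter M (2 ^ k) d r, 2 ^ (d + 1), 2 ^ d, (2 ^ k >>> 1) >>> d) := by
  intro d
  induction d with
  | zero =>
    intro _
    rw [fhtStages, List.range_zero, List.foldl_nil, stageIter]
    rfl
  | succ d ih =>
    intro hd
    have hdk : d < k := by omega
    have hstep : ∀ d' : Nat, fhtStages M d' (2 ^ k) r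
        = (List.range d').foldl (fun (st : List Int × Nat × Nat × Nat) _i =>
            ((List.range st.2.2.1).foldl (fun res k =>
                ((List.range st.2.2.2).foldl (fun (st2 : List Int × Nat × Nat) _j =>
                  ((st2.1.set st2.2.1
                      (PySem.Int.mod (st2.1.getD st2.2.1 0 + st2.1.getD st2.2.2 0) M)).set
                      st2.2.2 (PySem.Int.mod (st2.1.getD st2.2.1 0 - st2.1.getD st2.2.2 0) M),
                   st2.2.1 + st.2.1, st2.2.2 + st.2.1)) (res, k, k + st.2.2.1)).1) st.1,
             st.2.1 <<< 1, st.2.2.1 <<< 1, st.2.2.2 >>> 1))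
          (r, 2, 1, 2 ^ k >>> 1) := fun _ => rfl
    rw [hstep (d + 1), List.range_succ, List.foldl_append, List.foldl_cons, List.foldl_nil,
      ← hstep d, ih (by omega)]
    dsimp only
    have hVlen : (stageIter M (2 ^ k) d r).length = 2 ^ k := by
      cases d with
      | zero => rw [stageIter]; exact hr
      | succ d => exact stageIter_length _ _ _ _ (by omega)
    have hpk : 2 ^ (k - 1) * 2 = 2 ^ k := by
      rw [← pow_succ]; congr 1; omega
    have h2 : 2 ^ k / 2 = 2 ^ (k - 1) := by omega
    have hthgir : (2 ^ k >>> 1) >>> d = 2 ^ (k - d - 1) := by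
      rw [shiftRight_one, Nat.shiftRight_eq_div_pow, h2,
        Nat.pow_div (by omega) (by omega)]
      congr 1
      omega
    rw [hthgir, rowLoop, stage_bfold M k d hdk _ hVlen]
    refine congrArg₂ Prod.mk rfl ?_
    have e1 : (2:Nat) ^ (d + 1) <<< 1 = 2 ^ (d + 1 + 1) := by
      rw [Nat.shiftLeft_eq, ← pow_add]
    have e2 : (2:Nat) ^ d <<< 1 = 2 ^ (d + 1) := by
      rw [Nat.shiftLeft_eq, ← pow_add]
    have e3 : ((2 ^ k >>> 1) >>> d) >>> 1 = (2 ^ k >>> 1) >>> (d + 1) := by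
      simp only [Nat.shiftRight_succ, Nat.shiftRight_zero, shiftRight_one]
    rw [e1, e2, ← e3, hthgir]
  
theorem bitLength_two_pow (k : Nat) : PySem.Int.bitLength (((2 : Nat) ^ k : Nat) : Int) = k + 1 := by
  induction k with
  | zero =>
    rw [pow_zero, PySem.Int.bitLength_natCast (show 0 < 1 by omega)]
    norm_num
  | succ k ih =>
    rw [PySem.Int.bitLength_natCast (Nat.two_pow_pos (k + 1)),
      show 2 ^ (k + 1) / 2 = 2 ^ k by rw [pow_succ, Nat.mul_div_cancel _ (by omega)], ih]

theorem fhtA_spec (M : Int) (hM : M ≠ 0) (k : Nat) (hk : 1 ≤ k) (f : List Int)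
    (hf : 2 ^ k ≤ f.length) :
    fhtA f (2 ^ k) M = (List.range (2 ^ k)).map (fun i =>
      PySem.Int.mod (∑ j ∈ Finset.range (2 ^ k), sgn i j * f.getD (rev k j) 0) M) := by
  have hne1 : ¬ ((2:Nat) ^ k = 1) := by
    have := Nat.one_lt_two_pow_iff.2 (show k ≠ 0 by omega)
    omega
  rw [fhtA, if_neg hne1]
  obtain ⟨p, hfold, -⟩ := fhtPerm_inv f k (2 ^ k) rfl (2 ^ k) (le_refl _)
  have hperm : (fhtPerm f (2 ^ k)).1 = (List.range (2 ^ k)).map (fun i => f.getD (rev k i) 0) := by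
    rw [fhtPerm, hfold]
    simp
  have hdep : PySem.Int.bitLength (((2:Nat) ^ k : Nat) : Int) + 2 - 3 = k := by
    rw [bitLength_two_pow]; omega
  rw [hperm, hdep]
  have hrlen : ((List.range (2 ^ k)).map (fun i => f.getD (rev k i) 0)).length = 2 ^ k := by simp
  rw [fhtStages_inv M k _ hrlen k (le_refl k)]
  apply list_eq_of_getD
  · rw [stageIter_length _ _ _ _ hk]
    simp
  · intro i hi
    rw [stageIter_length _ _ _ _ hk] at hi
    rw [stageIter_spec M hM k _ hrlen k hk (le_refl k) i hi, getD_map_range, if_pos hi]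
    have h0 : i / 2 ^ k = 0 := Nat.div_eq_of_lt hi
    apply congrArg (fun z => PySem.Int.mod z M)
    apply Finset.sum_congr rfl
    intro j hj
    rw [Finset.mem_range] at hj
    rw [h0, Nat.zero_mul, Nat.zero_add, getD_map_range, if_pos hj]

theorem pc_eq_bitCount (m : Nat) : PySem.Int.bitCount ((m : Nat) : Int) = pc m := by
  induction m using Nat.strong_induction_on with
  | _ m ih =>
    by_cases h : m = 0
    · subst h
      rw [PySem.Int.bitCount_natCast_zero, pc_zero]
    · rw [PySem.Int.bitCount_natCast (show 0 < m by omega), ih (m / 2) (by omega), pc_step m]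

theorem sgn_if (i j : Nat) (v : Int) :
    (if PySem.Int.bitCount (PySem.Int.band (i : Int) (j : Int)) % 2 = 1 then -v else v)
      = sgn i j * v := by
  rw [PySem.Int.band_natCast, pc_eq_bitCount, sgn]
  rcases Nat.even_or_odd (pc (i &&& j)) with he | ho
  · have h0 := Nat.even_iff.1 he
    rw [he.neg_one_pow, if_neg (by omega)]
    ring
  · have h1 := Nat.odd_iff.1 ho
    rw [ho.neg_one_pow, if_pos h1]
    ring

theorem enum_sum (i : Nat) (M : Int) : ∀ (l : List Int) (st : Nat) (acc : Int),
    (PySem.List.enumerate l (st : Int)).foldl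
      (fun s jv => s + (if PySem.Int.bitCount (PySem.Int.band (i : Int) jv.1) % 2 = 1
        then -jv.2 else jv.2)) acc
      = acc + ∑ t ∈ Finset.range l.length, sgn i (st + t) * l.getD t 0 := by
  intro l
  induction l with
  | nil => intro st acc; simp [PySem.List.enumerate_nil]
  | cons x xs ih =>
    intro st acc
    have hsum : (∑ t ∈ Finset.range xs.length, sgn i (st + (t + 1)) * xs.getD t 0)
        = ∑ t ∈ Finset.range xs.length, sgn i (st + 1 + t) * xs.getD t 0 :=
      Finset.sum_congr rfl (fun t _ => by rw [show st + (t + 1) = st + 1 + t by omega])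
    rw [PySem.List.enumerate_cons, List.foldl_cons,
      show ((st : Int) + 1) = (((st + 1 : Nat)) : Int) by push_cast; ring, ih]
    rw [List.length_cons, Finset.sum_range_succ']
    simp only [List.getD_cons_succ, List.getD_cons_zero]
    rw [hsum, sgn_if i st x]
    ring

theorem whtB_spec (a : List Int) (n : Nat) (M : Int) (hn : n ≤ a.length) :
    whtB a n M = (List.range n).map (fun i =>
      PySem.Int.mod (∑ j ∈ Finset.range n, sgn i j * a.getD j 0) M) := by
  rw [whtB]
  apply List.map_congr_left
  intro i hi
  have h := enum_sum i M (a.take n) 0 0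
  rw [Nat.cast_zero] at h
  rw [h]
  have hlen : (a.take n).length = n := by simp [hn]
  rw [hlen, Int.zero_add]
  apply congrArg (fun z => PySem.Int.mod z M)
  apply Finset.sum_congr rfl
  intro j hj
  rw [Finset.mem_range] at hj
  rw [Nat.zero_add]
  congr 1
  rw [List.getD_eq_getElem?_getD, List.getD_eq_getElem?_getD, List.getElem?_take_of_lt hj]

theorem binTop_spec : ∀ (c b t : Nat), t - b ≤ c → 0 < b →
    ∃ e, binTop b t = b * 2 ^ e ∧ t ≤ b * 2 ^ e := by
  intro c
  induction c with
  | zero =>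
    intro b t h hb
    rw [binTop, if_neg (by omega)]
    exact ⟨0, by norm_num, by omega⟩
  | succ c ih =>
    intro b t h hb
    by_cases hc : 0 < b ∧ b < t
    · obtain ⟨e, h1, h2⟩ := ih (2 * b) t (by omega) (by omega)
      refine ⟨e + 1, ?_, ?_⟩
      · rw [binTop, if_pos hc, h1]
        ring
      · have : 2 * b * 2 ^ e = b * 2 ^ (e + 1) := by ring
        omega
    · rw [binTop, if_neg hc]
      exact ⟨0, by norm_num, by omega⟩

theorem sum_rev_reindex (e : Nat) (F : Nat → Int) :
    (∑ j ∈ Finset.range (2 ^ e), F (rev e j)) = ∑ j ∈ Finset.range (2 ^ e), F j := by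
  apply Finset.sum_bij' (fun a _ => rev e a) (fun a _ => rev e a)
  · intro a ha
    exact Finset.mem_range.2 (rev_lt e a)
  · intro a ha
    exact Finset.mem_range.2 (rev_lt e a)
  · intro a ha
    exact rev_rev e a (Finset.mem_range.1 ha)
  · intro a ha
    exact rev_rev e a (Finset.mem_range.1 ha)
  · intro a ha
    rfl

def WS (v : List Int) (i n : Nat) : Int := ∑ j ∈ Finset.range n, sgn i j * v.getD j 0

-- A's transform entries: bit-reversed Walsh sums
theorem fhtA_entry (M : Int) (hM : M ≠ 0) (e : Nat) (he : 1 ≤ e) (v : List Int)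
    (hv : 2 ^ e ≤ v.length) (t : Nat) (ht : t < 2 ^ e) :
    (fhtA v (2 ^ e) M).getD t 0 = PySem.Int.mod (WS v (rev e t) (2 ^ e)) M := by
  rw [fhtA_spec M hM e he v hv, getD_map_range, if_pos ht]
  apply congrArg (fun z => PySem.Int.mod z M)
  have h1 : (∑ j ∈ Finset.range (2 ^ e), sgn t j * v.getD (rev e j) 0)
      = ∑ j ∈ Finset.range (2 ^ e), sgn t (rev e (rev e j)) * v.getD (rev e j) 0 :=
    Finset.sum_congr rfl (fun j hj => by
      rw [rev_rev e j (Finset.mem_range.1 hj)])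
  rw [h1, sum_rev_reindex e (fun j => sgn t (rev e j) * v.getD j 0), WS]
  exact Finset.sum_congr rfl (fun j hj => by
    rw [sgn_rev e t j ht (Finset.mem_range.1 hj)])

-- B's transform entries
theorem xor_convolution_eq (f g : List Int) (M : Int) (hM : M ≠ 0)
    (hfg : f.length ≤ g.length) :
    xor_convolution f g M = xor_convolution_alt f g M := by
  obtain ⟨e, hb, hle⟩ := binTop_spec f.length 1 f.length (by omega) (by omega)
  rw [one_mul] at hb hle
  have hxc : xor_convolution f g M
      = (List.range (binTop 1 f.length)).foldl
          (fun acc i => acc.set i (PySem.Int.mod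
            (acc.getD i 0 * inved ((binTop 1 f.length : Nat) : Int) M) M))
          (fhtA ((List.range (binTop 1 f.length)).foldl
            (fun acc i => acc.set i (PySem.Int.mod (acc.getD i 0 *
              (fhtA (g ++ List.replicate (binTop 1 f.length - f.length) 0)
                (binTop 1 f.length) M).getD i 0) M))
            (fhtA (f ++ List.replicate (binTop 1 f.length - f.length) 0)
              (binTop 1 f.length) M)) (binTop 1 f.length) M) := by
    rw [xor_convolution]
    simp only [Nat.max_self]
  have hxa : xor_convolution_alt f g M
      = (whtB
          (((whtB (f ++ List.replicate (binTop 1 f.length - f.length) 0)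
              (binTop 1 f.length) M).zip
            (whtB (g ++ List.replicate (binTop 1 f.length - f.length) 0)
              (binTop 1 f.length) M)).map
            (fun pq => PySem.Int.mod (pq.1 * pq.2) M))
          (binTop 1 f.length) M).map
          (fun w => PySem.Int.mod (w * inved ((binTop 1 f.length : Nat) : Int) M) M) := by
    rw [xor_convolution_alt]
  rw [hxc, hxa, hb]
  have hx0len : (f ++ List.replicate (2 ^ e - f.length) 0).length = 2 ^ e := by
    simp
    omega
  have hy0len : 2 ^ e ≤ (g ++ List.replicate (2 ^ e - f.length) 0).length := by
    simp
    omega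
  set x0 := f ++ List.replicate (2 ^ e - f.length) 0 with hx0
  set y0 := g ++ List.replicate (2 ^ e - f.length) 0 with hy0
  by_cases he : 1 ≤ e
  · -- main case: a genuine power-of-two length ≥ 2
    -- B side normal forms
    have hbx := whtB_spec x0 (2 ^ e) M (by omega)
    have hby := whtB_spec y0 (2 ^ e) M (by omega)
    have hzin : ((whtB x0 (2 ^ e) M).zip (whtB y0 (2 ^ e) M)).map
        (fun pq => PySem.Int.mod (pq.1 * pq.2) M)
        = (List.range (2 ^ e)).map (fun i => PySem.Int.mod
            (PySem.Int.mod (WS x0 i (2 ^ e)) M * PySem.Int.mod (WS y0 i (2 ^ e)) M) M) := by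
      rw [hbx, hby, List.zip_map', List.map_map]
      rfl
    have hzinlen : (((whtB x0 (2 ^ e) M).zip (whtB y0 (2 ^ e) M)).map
        (fun pq => PySem.Int.mod (pq.1 * pq.2) M)).length = 2 ^ e := by
      rw [hzin]
      simp
    -- A side: the two in-place wrapper loops become maps
    have hx1len : (fhtA x0 (2 ^ e) M).length = 2 ^ e := by
      rw [fhtA_spec M hM e he x0 (by omega)]
      simp
    have hloop1 := foldl_set_range
      (fun i v => PySem.Int.mod (v * (fhtA y0 (2 ^ e) M).getD i 0) M)
      (fhtA x0 (2 ^ e) M) (2 ^ e) (by omega)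
    simp only [] at hloop1
    rw [hloop1, show (fhtA x0 (2 ^ e) M).drop (2 ^ e) = [] from
      List.drop_eq_nil_of_le (by rw [hx1len]), List.append_nil]
    set x2 := (List.range (2 ^ e)).map
      (fun i => PySem.Int.mod ((fhtA x0 (2 ^ e) M).getD i 0 * (fhtA y0 (2 ^ e) M).getD i 0) M)
      with hx2
    have hx2len : x2.length = 2 ^ e := by rw [hx2]; simp
    have hx3len : (fhtA x2 (2 ^ e) M).length = 2 ^ e := by
      rw [fhtA_spec M hM e he x2 (by omega)]
      simp
    have hloop2 := foldl_set_range
      (fun i v => PySem.Int.mod (v * inved ((2 ^ e : Nat) : Int) M) M)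
      (fhtA x2 (2 ^ e) M) (2 ^ e) (by omega)
    simp only [] at hloop2
    rw [hloop2, show (fhtA x2 (2 ^ e) M).drop (2 ^ e) = [] from
      List.drop_eq_nil_of_le (by rw [hx3len]), List.append_nil]
    -- compare entrywise
    rw [hzin]
    have hzlen : ((List.range (2 ^ e)).map (fun i => PySem.Int.mod
        (PySem.Int.mod (WS x0 i (2 ^ e)) M * PySem.Int.mod (WS y0 i (2 ^ e)) M) M)).length
        = 2 ^ e := by simp
    rw [whtB_spec _ (2 ^ e) M (by omega), List.map_map]
    apply List.map_congr_left
    intro i hi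
    rw [List.mem_range] at hi
    have hx3entry : (fhtA x2 (2 ^ e) M).getD i 0
        = PySem.Int.mod (WS x2 (rev e i) (2 ^ e)) M :=
      fhtA_entry M hM e he x2 (by omega) i hi
    rw [hx3entry]
    simp only [Function.comp]
    apply congrArg (fun z => PySem.Int.mod (z * inved ((2 ^ e : Nat) : Int) M) M)
    apply congrArg (fun z => PySem.Int.mod z M)
    -- WS x2 (rev e i) = the zin-sum at i ... both are ∑ sgn i j * mod (mod X * mod Y)
    rw [WS]
    have hterm : ∀ j ∈ Finset.range (2 ^ e),
        sgn (rev e i) j * x2.getD j 0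
          = sgn (rev e i) j * PySem.Int.mod
              (PySem.Int.mod (WS x0 (rev e j) (2 ^ e)) M *
               PySem.Int.mod (WS y0 (rev e j) (2 ^ e)) M) M := by
      intro j hj
      rw [Finset.mem_range] at hj
      rw [hx2, getD_map_range, if_pos hj,
        fhtA_entry M hM e he x0 (by omega) j hj,
        fhtA_entry M hM e he y0 (by omega) j hj]
    rw [Finset.sum_congr rfl hterm]
    -- reindex by rev on the A side; B side is the plain sum
    have h1 : (∑ j ∈ Finset.range (2 ^ e), sgn (rev e i) j * PySem.Int.mod
        (PySem.Int.mod (WS x0 (rev e j) (2 ^ e)) M *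
         PySem.Int.mod (WS y0 (rev e j) (2 ^ e)) M) M)
        = ∑ j ∈ Finset.range (2 ^ e), sgn (rev e i) (rev e (rev e j)) * PySem.Int.mod
        (PySem.Int.mod (WS x0 (rev e j) (2 ^ e)) M *
         PySem.Int.mod (WS y0 (rev e j) (2 ^ e)) M) M :=
      Finset.sum_congr rfl (fun j hj => by rw [rev_rev e j (Finset.mem_range.1 hj)])
    rw [h1, sum_rev_reindex e (fun j => sgn (rev e i) (rev e j) * PySem.Int.mod
        (PySem.Int.mod (WS x0 j (2 ^ e)) M * PySem.Int.mod (WS y0 j (2 ^ e)) M) M)]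
    apply Finset.sum_congr rfl
    intro j hj
    rw [Finset.mem_range] at hj
    rw [sgn_rev e (rev e i) j (rev_lt e i) hj, rev_rev e i hi, getD_map_range, if_pos hj]
  · -- degenerate case: bin_top = 1
    have he0 : e = 0 := by omega
    subst he0
    rw [pow_zero] at hb hle hx0len hy0len ⊢
    have hf1 : fhtA x0 1 M = x0 := by rw [fhtA, if_pos rfl]
    have hg1 : fhtA y0 1 M = y0 := by rw [fhtA, if_pos rfl]
    rw [hf1, hg1]
    have hloop1 := foldl_set_range
      (fun i v => PySem.Int.mod (v * y0.getD i 0) M) x0 1 (by omega)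
    simp only [] at hloop1
    rw [hloop1, show x0.drop 1 = [] by rw [← hx0len, List.drop_length], List.append_nil]
    set x2 := (List.range 1).map (fun i => PySem.Int.mod (x0.getD i 0 * y0.getD i 0) M) with hx2
    have hx2len : x2.length = 1 := by rw [hx2]; simp
    have hf2 : fhtA x2 1 M = x2 := by rw [fhtA, if_pos rfl]
    rw [hf2]
    have hloop2 := foldl_set_range
      (fun i v => PySem.Int.mod (v * inved ((1 : Nat) : Int) M) M) x2 1 (by omega)
    simp only [] at hloop2
    rw [hloop2, show x2.drop 1 = [] by rw [← hx2len, List.drop_length], List.append_nil]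
    -- B side
    rw [whtB_spec x0 1 M (by omega), whtB_spec y0 1 M (by omega)]
    rw [List.zip_map', List.map_map]
    rw [whtB_spec _ 1 M (by simp), List.map_map]
    apply List.map_congr_left
    intro i hi
    rw [List.mem_range] at hi
    have hi0 : i = 0 := by omega
    subst hi0
    simp only [Function.comp]
    rw [hx2, getD_map_range, if_pos (by omega)]
    have hWS : ∀ (v : List Int) (t : Nat), WS v t 1 = v.getD 0 0 := by
      intro v t
      rw [WS, Finset.sum_range_one, sgn_zero_right, one_mul]
    apply congrArg (fun z => PySem.Int.mod (z * inved ((1 : Nat) : Int) M) M)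
    rw [Finset.sum_range_one, sgn_zero_right, one_mul, getD_map_range, if_pos (by omega)]
    simp only [Function.comp]
    rw [Finset.sum_range_one, Finset.sum_range_one, sgn_zero_right, one_mul, one_mul,
      pmod_pmod hM]
    exact (pmod_eq_of_modEq hM ((pmod_modEq _ M).mul (pmod_modEq _ M))).symm


-- ===== VERDICT (by name: the statement is the Claim_ definition above) =====
theorem xor_convolution_spec : Claim_equal_xor_convolution := by
  intro f g MOD _ hP
  unfold Spec_xor_convolution
  exact xor_convolution_eq f g MOD hP.1 hP.2
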